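-- pv_equiv track=rewrite | github.com/ruirui688/SLAM | tools/build_human_labeling_packet_p196.py | audit_human_column
-- ===== SOURCE A (Python) =====
-- from collections import Counter, defaultdict
--
-- def audit_human_column(rows: list[dict[str, str]], column: str) -> dict[str, int]:
--     valid = {"0", "1"}
--     counter = Counter()
--     for row in rows:
--         value = row.get(column, "").strip()
--         if value == "":
--             counter["blank"] += 1
--         elif value in valid:
--             counter["valid"] += 1
--         else:
--             counter["invalid"] += 1
--     return {"blank": counter["blank"], "valid": counter["valid"], "invalid": counter["invalid"]}
-- ===== SOURCE B (Python) =====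
-- def audit_human_column(rows: list[dict[str, str]], column: str) -> dict[str, int]:
--     values = [row.get(column, "").strip() for row in rows]
--     blank = values.count("")
--     valid = sum(1 for v in values if v in {"0", "1"})
--     return {"blank": blank, "valid": valid, "invalid": len(values) - blank - valid}
-- ===== Notes on version B (the rewrite author's own statement) =====
-- stated objective: simpler
-- what changed: Replaces the single-pass three-way Counter branch with one pass that strips all values, then per-category counts (count('') for blank, a membership count for valid) and derives invalid by arithmetic complement.
import Mathlib
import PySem

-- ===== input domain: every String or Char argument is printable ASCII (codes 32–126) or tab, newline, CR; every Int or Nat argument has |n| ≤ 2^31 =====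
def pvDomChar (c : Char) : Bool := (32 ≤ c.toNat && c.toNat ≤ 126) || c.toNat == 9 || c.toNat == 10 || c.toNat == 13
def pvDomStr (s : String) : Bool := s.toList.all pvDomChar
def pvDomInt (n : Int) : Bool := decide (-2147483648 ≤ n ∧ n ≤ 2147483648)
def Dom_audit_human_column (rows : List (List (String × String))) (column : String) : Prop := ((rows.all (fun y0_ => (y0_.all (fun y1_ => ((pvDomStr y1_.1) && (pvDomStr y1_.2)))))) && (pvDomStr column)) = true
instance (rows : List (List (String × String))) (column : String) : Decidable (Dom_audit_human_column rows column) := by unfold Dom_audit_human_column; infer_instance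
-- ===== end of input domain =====

-- B is simpler: strip all values once, count blank and valid directly, derive invalid by complement.

-- ===== PORT A =====
-- single pass: Counter bumped by a three-way branch per row, then the three counts read out
def audit_human_column (rows : List (List (String × String))) (column : String) : List (String × Int) :=
  let counter : PySem.Dict String Int :=
    rows.foldl (fun d row =>
      let value := PySem.Str.strip ((PySem.Dict.ofList row).getD column "")
      if value = "" then d.modify "blank" 0 (· + 1)
      else if value = "0" ∨ value = "1" then d.modify "valid" 0 (· + 1)
      else d.modify "invalid" 0 (· + 1)) PySem.Dict.empty
  [("blank", counter.getD "blank" 0), ("valid", counter.getD "valid" 0), ("invalid", counter.getD "invalid" 0)]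

-- ===== PORT B =====
-- strip once, then per-category counts; invalid = len - blank - valid
def audit_human_column_alt (rows : List (List (String × String))) (column : String) : List (String × Int) :=
  let values := rows.map (fun row => PySem.Str.strip ((PySem.Dict.ofList row).getD column ""))
  let blank : Int := values.count ""
  let valid : Int := (values.countP (fun v => v == "0" || v == "1") : Nat)
  [("blank", blank), ("valid", valid), ("invalid", (values.length : Int) - blank - valid)]

-- ===== PRECONDITION & SPEC =====
def Spec_audit_human_column (rows : List (List (String × String))) (column : String) (out : List (String × Int)) : Prop := out = audit_human_column_alt rows column
instance (rows : List (List (String × String))) (column : String) (out : List (String × Int)) : Decidable (Spec_audit_human_column rows column out) := by unfold Spec_audit_human_column; infer_instance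

-- ===== CLAIM (what is proved, stated in full; the proofs are below) =====
def Claim_equal_audit_human_column : Prop := ∀ (rows : List (List (String × String))) (column : String), Dom_audit_human_column rows column → Spec_audit_human_column rows column (audit_human_column rows column)

-- ===== LEMMAS AND PROOFS =====

-- the category A's branch assigns to a stripped value
def pvCat (v : String) : String :=
  if v = "" then "blank" else if v = "0" ∨ v = "1" then "valid" else "invalid"

-- A's fold is Counter(category of each value)
lemma audit_foldl_eq_counter (rows : List (List (String × String))) (column : String) :
    rows.foldl (fun (d : PySem.Dict String Int) row =>
      let value := PySem.Str.strip ((PySem.Dict.ofList row).getD column "")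
      if value = "" then d.modify "blank" 0 (· + 1)
      else if value = "0" ∨ value = "1" then d.modify "valid" 0 (· + 1)
      else d.modify "invalid" 0 (· + 1)) PySem.Dict.empty
    = PySem.Dict.counter ((rows.map (fun row => PySem.Str.strip ((PySem.Dict.ofList row).getD column ""))).map pvCat) := by
  rw [PySem.Dict.counter_eq_foldl, List.foldl_map, List.foldl_map]
  apply PySem.List.foldl_congr_mem
  intro d row _
  simp only [pvCat]
  split_ifs <;> rfl

-- counting categories = B's direct counts
lemma cat_counts (vs : List String) :
    ((vs.map pvCat).count "blank" : Int) = (vs.count "" : Nat)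
    ∧ ((vs.map pvCat).count "valid" : Int) = (vs.countP (fun v => v == "0" || v == "1") : Nat)
    ∧ ((vs.map pvCat).count "invalid" : Int) = (vs.length : Int) - (vs.count "" : Nat) - (vs.countP (fun v => v == "0" || v == "1") : Nat) := by
  induction vs with
  | nil => simp
  | cons v vs ih =>
    obtain ⟨h1, h2, h3⟩ := ih
    simp only [List.map_cons, List.count_cons, List.countP_cons, List.length_cons]
    by_cases hb : v = ""
    · subst hb
      simp [pvCat] at *
      omega
    · by_cases hv : v = "0" ∨ v = "1"
      · have : pvCat v = "valid" := by simp [pvCat, hb, hv]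
        have hvb : (v == "0" || v == "1") = true := by
          rcases hv with h | h <;> simp [h]
        simp [this, hb, hvb] at *
        omega
      · have : pvCat v = "invalid" := by simp [pvCat, hb, hv]
        have hvb : (v == "0" || v == "1") = false := by
          rw [not_or] at hv
          simp [hv.1, hv.2]
        simp [this, hb, hvb] at *
        omega

-- ===== VERDICT (by name: the statement is the Claim_ definition above) =====
theorem audit_human_column_spec : Claim_equal_audit_human_column := by
  intro rows column _
  unfold Spec_audit_human_column audit_human_column audit_human_column_alt
  simp only [audit_foldl_eq_counter, PySem.Dict.getD_counter]
  obtain ⟨h1, h2, h3⟩ := cat_counts (rows.map (fun row => PySem.Str.strip ((PySem.Dict.ofList row).getD column "")))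
  simp only [h1, h2, h3]
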